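-- pv_equiv track=rewrite | github.com/cbw29512/dungeoncourtroom-pipeline | scripts/pull_rss.py | pick_next_case
-- ===== SOURCE A (Python) =====
-- from typing import Dict, List, Optional
--
-- CASE_TITLE_PREFIX = "Case Submission:"
--
-- EXCLUDE_TITLE_SUBSTRINGS = [
--     "Welcome to Dungeon Courtroom",
--     "Start Here:",
--     "Submit Your D&D Case",
--     "Template Inside",
-- ]
--
-- def _is_excluded_title(title: str) -> bool:
--     t = (title or "").strip().lower()
--     return any(s.lower() in t for s in EXCLUDE_TITLE_SUBSTRINGS)
--
-- def pick_next_case(entries: List[dict], seen: Dict[str, bool]) -> Optional[dict]: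
--     """
--     Two-pass selection:
--       Pass 1: Prefer explicit Case Submission posts.
--       Pass 2: Otherwise accept any new post (except excluded pinned/info).
--     """
--     def is_seen(post_id: str) -> bool:
--         return bool(seen.get(post_id, False))
--
--     # Pass 1 (preferred)
--     for e in entries:
--         title = (e.get("title") or "").strip()
--         post_id = (e.get("post_id") or "").strip()
--         if not post_id or is_seen(post_id) or _is_excluded_title(title):
--             continue
--         if CASE_TITLE_PREFIX.lower() in title.lower():
--             return e
--
--     # Pass 2 (fallback)
--     for e in entries:
--         title = (e.get("title") or "").strip()
--         post_id = (e.get("post_id") or "").strip()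
--         if not post_id or is_seen(post_id) or _is_excluded_title(title):
--             continue
--         return e
--
--     return None
-- ===== SOURCE B (Python) =====
-- from typing import Dict, List, Optional
--
-- CASE_TITLE_PREFIX = "Case Submission:"
--
-- EXCLUDE_TITLE_SUBSTRINGS = [
--     "Welcome to Dungeon Courtroom",
--     "Start Here:",
--     "Submit Your D&D Case",
--     "Template Inside",
-- ]
--
-- def _is_excluded_title(title: str) -> bool:
--     t = (title or "").strip().lower()
--     return any(s.lower() in t for s in EXCLUDE_TITLE_SUBSTRINGS)
--
-- def pick_next_case(entries: List[dict], seen: Dict[str, bool]) -> Optional[dict]: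
--     """Single pass: return the first eligible Case Submission post; otherwise
--     remember the first eligible post as a fallback and return it at the end."""
--     fallback = None
--     for e in entries:
--         title = (e.get("title") or "").strip()
--         post_id = (e.get("post_id") or "").strip()
--         if not post_id or bool(seen.get(post_id, False)) or _is_excluded_title(title):
--             continue
--         if CASE_TITLE_PREFIX.lower() in title.lower():
--             return e
--         if fallback is None:
--             fallback = e
--     return fallback
-- ===== Notes on version B (the rewrite author's own statement) =====
-- stated objective: alternative
-- what changed: Replaces A's two full passes over the entries (case-submission pass, then fallback pass) with a single traversal that returns the first eligible case-submission immediately and records the first eligible non-case entry in a fallback variable returned at the end.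
import Mathlib
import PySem

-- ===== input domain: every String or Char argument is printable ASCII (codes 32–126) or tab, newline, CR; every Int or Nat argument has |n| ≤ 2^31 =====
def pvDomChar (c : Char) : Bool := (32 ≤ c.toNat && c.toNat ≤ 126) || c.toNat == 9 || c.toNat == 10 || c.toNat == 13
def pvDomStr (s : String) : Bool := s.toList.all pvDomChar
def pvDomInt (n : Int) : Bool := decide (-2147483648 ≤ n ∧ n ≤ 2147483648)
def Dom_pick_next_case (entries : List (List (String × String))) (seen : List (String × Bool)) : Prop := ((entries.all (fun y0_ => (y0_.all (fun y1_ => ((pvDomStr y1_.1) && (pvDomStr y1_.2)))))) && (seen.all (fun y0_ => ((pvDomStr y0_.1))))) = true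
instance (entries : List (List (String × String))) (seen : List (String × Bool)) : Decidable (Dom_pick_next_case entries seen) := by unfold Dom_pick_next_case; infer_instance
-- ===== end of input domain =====

-- B is a single pass with a `fallback` accumulator instead of A's two passes (objective: alternative decomposition).

-- shared module-level constants and helper (identical in Source A and Source B)
def CASE_TITLE_PREFIX : String := "Case Submission:"

def EXCLUDE_TITLE_SUBSTRINGS : List String :=
  ["Welcome to Dungeon Courtroom", "Start Here:", "Submit Your D&D Case", "Template Inside"]

-- _is_excluded_title: t = title.strip().lower(); any(s.lower() in t for s in EXCLUDE_TITLE_SUBSTRINGS)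
-- (`title or ""` is the identity on strings here: "" stays "")
def is_excluded_title (title : String) : Bool :=
  let t := PySem.Str.lower (PySem.Str.strip title)
  EXCLUDE_TITLE_SUBSTRINGS.any (fun s => PySem.Str.isIn (PySem.Str.lower s) t)

-- `(e.get(k) or "").strip()`: missing key and empty value both give ""
def getStripped (e : List (String × String)) (k : String) : String :=
  PySem.Str.strip (PySem.Dict.getD (PySem.Dict.mk e) k "")

-- the shared per-entry filter of both Pythons: post_id nonempty, not seen, title not excluded
def eligible (seen : List (String × Bool)) (e : List (String × String)) : Bool :=
  let title := getStripped e "title"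
  let post_id := getStripped e "post_id"
  !(post_id == "" || PySem.Dict.getD (PySem.Dict.mk seen) post_id false || is_excluded_title title)

def isCaseTitle (e : List (String × String)) : Bool :=
  PySem.Str.isIn (PySem.Str.lower CASE_TITLE_PREFIX) (PySem.Str.lower (getStripped e "title"))

-- ===== PORT A =====
-- Pass 1: first eligible entry whose title contains the case prefix
def pickPass1 (seen : List (String × Bool)) : List (List (String × String)) → Option (List (String × String))
  | [] => none
  | e :: rest =>
    if eligible seen e then
      if isCaseTitle e then some e else pickPass1 seen rest
    else pickPass1 seen rest

-- Pass 2: first eligible entry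
def pickPass2 (seen : List (String × Bool)) : List (List (String × String)) → Option (List (String × String))
  | [] => none
  | e :: rest => if eligible seen e then some e else pickPass2 seen rest

def pick_next_case (entries : List (List (String × String))) (seen : List (String × Bool)) : Option (List (String × String)) :=
  match pickPass1 seen entries with
  | some e => some e
  | none => pickPass2 seen entries

-- ===== PORT B =====
-- single loop with a `fallback` accumulator (set only while still none)
def pickGo (seen : List (String × Bool)) (fallback : Option (List (String × String))) :
    List (List (String × String)) → Option (List (String × String))
  | [] => fallback
  | e :: rest =>
    if eligible seen e then
      if isCaseTitle e then some e
      else pickGo seen (if fallback.isNone then some e else fallback) rest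
    else pickGo seen fallback rest

def pick_next_case_alt (entries : List (List (String × String))) (seen : List (String × Bool)) : Option (List (String × String)) :=
  pickGo seen none entries

-- ===== PRECONDITION & SPEC =====
def Spec_pick_next_case (entries : List (List (String × String))) (seen : List (String × Bool)) (out : Option (List (String × String))) : Prop := out = pick_next_case_alt entries seen
instance (entries : List (List (String × String))) (seen : List (String × Bool)) (out : Option (List (String × String))) : Decidable (Spec_pick_next_case entries seen out) := by unfold Spec_pick_next_case; infer_instance

-- ===== CLAIM (what is proved, stated in full; the proofs are below) =====
def Claim_equal_pick_next_case : Prop := ∀ (entries : List (List (String × String))) (seen : List (String × Bool)), Dom_pick_next_case entries seen → Spec_pick_next_case entries seen (pick_next_case entries seen)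

-- ===== LEMMAS AND PROOFS =====

-- loop invariant: the single pass equals pass1, else the pending fallback, else pass2
theorem pickGo_eq (seen : List (String × Bool)) (fallback : Option (List (String × String)))
    (entries : List (List (String × String))) :
    pickGo seen fallback entries =
      match pickPass1 seen entries with
      | some e => some e
      | none =>
        match fallback with
        | some x => some x
        | none => pickPass2 seen entries := by
  induction entries generalizing fallback with
  | nil => cases fallback <;> simp [pickGo, pickPass1, pickPass2]
  | cons e rest ih =>
    by_cases he : eligible seen e
    · by_cases hc : isCaseTitle e
      · simp [pickGo, pickPass1, he, hc]
      · cases fallback <;>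
          simp [pickGo, pickPass1, pickPass2, he, hc, ih]
    · simp [pickGo, pickPass1, pickPass2, he, ih]

-- ===== VERDICT (by name: the statement is the Claim_ definition above) =====
theorem pick_next_case_spec : Claim_equal_pick_next_case := by
  intro entries seen _
  unfold Spec_pick_next_case pick_next_case pick_next_case_alt
  rw [pickGo_eq]
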